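-- pv_equiv track=rewrite | github.com/lyuzhuoqi/MolScanner | MolScanner/scripts/normalise_rgroup.py | _replace_bare_stars
-- ===== SOURCE A (Python) =====
-- from typing import Dict, List, Optional
--
-- def _replace_bare_stars(smiles: str, labels: List[str]) -> str:
--     """Replace each bare ``*`` in *smiles* with ``[label]`` from *labels*."""
--     parts: List[str] = []
--     idx = 0
--     i = 0
--     while i < len(smiles):
--         if smiles[i] == '[':
--             j = smiles.find(']', i + 1)
--             if j == -1:
--                 j = len(smiles) - 1
--             parts.append(smiles[i:j + 1])
--             i = j + 1
--         elif smiles[i] == '*':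
--             lab = labels[idx] if idx < len(labels) else 'R'
--             parts.append(f'[{lab}]')
--             idx += 1
--             i += 1
--         else:
--             parts.append(smiles[i])
--             i += 1
--     return ''.join(parts)
-- ===== SOURCE B (Python) =====
-- from typing import Dict, List, Optional
--
-- def _replace_bare_stars(smiles: str, labels: List[str]) -> str:
--     """Replace each bare ``*`` in *smiles* with ``[label]`` from *labels*.
--
--     Split-based: cut the string at every ``]``; inside each chunk everything
--     from the first ``[`` onward belongs to a bracket token (closed by the
--     chunk-ending ``]``, or by end of string for the last chunk) and is kept
--     verbatim, while the star-replacement happens only in the bracket-free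
--     prefix, done by splitting that prefix on ``*``.
--     """
--     it = iter(labels)
--
--     def fill(seg: str) -> str:
--         # replace each '*' in a bracket-free segment
--         pieces = seg.split('*')
--         parts = [pieces[0]]
--         for p in pieces[1:]:
--             parts.append('[' + next(it, 'R') + ']')
--             parts.append(p)
--         return ''.join(parts)
--
--     def chunk_out(chunk: str) -> str:
--         b = chunk.find('[')
--         if b == -1:
--             return fill(chunk)
--         return fill(chunk[:b]) + chunk[b:]
--
--     return ']'.join(chunk_out(c) for c in smiles.split(']'))
-- ===== Notes on version B (the rewrite author's own statement) =====
-- stated objective: faster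
-- what changed: Replaces A's index-driven per-character while-loop scanner with a split-based pipeline: cut the SMILES at every ']', keep each chunk's bracket part (from its first '[') verbatim, and substitute labels for stars in the bracket-free prefixes via split('*'), joining chunks back with ']'.
import Mathlib
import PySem

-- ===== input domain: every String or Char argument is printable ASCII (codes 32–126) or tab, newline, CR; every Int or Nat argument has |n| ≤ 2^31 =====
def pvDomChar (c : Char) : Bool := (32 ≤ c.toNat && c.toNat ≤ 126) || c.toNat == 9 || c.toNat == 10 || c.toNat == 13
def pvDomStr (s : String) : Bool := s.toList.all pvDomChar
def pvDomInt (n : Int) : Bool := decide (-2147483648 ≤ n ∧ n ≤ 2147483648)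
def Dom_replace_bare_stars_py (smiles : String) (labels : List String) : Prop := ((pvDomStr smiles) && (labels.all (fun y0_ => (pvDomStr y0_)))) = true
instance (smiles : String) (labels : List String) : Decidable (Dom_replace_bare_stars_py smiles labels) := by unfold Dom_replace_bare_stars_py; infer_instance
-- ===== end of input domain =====

-- B replaces A's index-driven character scanner by a split-on-']' / split-on-'*' pipeline
-- (alternative decomposition; return values proved equal on the whole domain).

-- ===== PORT A =====
-- s.find(']', i+1) returns at least i+1 when it does not return -1 (used for termination of the while loop's port)
theorem pvFindFrom_ge (cs : List Char) (i : Nat) (hi : i < cs.length)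
    (h : PySem.Chars.findFrom cs [']'] ((i : Int) + 1) none ≠ -1) :
    (i : Int) + 1 ≤ PySem.Chars.findFrom cs [']'] ((i : Int) + 1) none := by
  have hk : i + 1 ≤ cs.length := hi
  have := PySem.Chars.findFrom_natCast_spec cs [']'] (i + 1) hk (by push_cast at h ⊢; exact_mod_cast h)
  push_cast at this ⊢
  exact_mod_cast this.1

-- the two lines "j = smiles.find(']', i + 1); if j == -1: j = len(smiles) - 1" of A's bracket branch
def pvJ2 (cs : List Char) (i : Nat) : Int :=
  let j : Int := PySem.Chars.findFrom cs [']'] ((i : Int) + 1) none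
  if j = -1 then (cs.length : Int) - 1 else j

-- the while loop of A: state (i, idx); parts.append/''.join ported as direct concatenation of the appended pieces
def pvAGo (cs : List Char) (labels : List String) (i idx : Nat) : List Char :=
  if h : i < cs.length then
    if cs[i] = '[' then
      PySem.List.slice cs (some (i : Int)) (some (pvJ2 cs i + 1)) ++
        pvAGo cs labels ((pvJ2 cs i).toNat + 1) idx
    else if cs[i] = '*' then
      let lab := if idx < labels.length then labels.getD idx "R" else "R"
      ('[' :: lab.toList ++ [']']) ++ pvAGo cs labels (i + 1) (idx + 1)
    else
      cs[i] :: pvAGo cs labels (i + 1) idx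
  else []
termination_by cs.length - i
decreasing_by
  · -- bracket branch: i < (pvJ2 cs i).toNat + 1
    simp only [pvJ2]
    split
    · omega
    · rename_i hj
      have := pvFindFrom_ge cs i h hj
      omega
  · omega
  · omega

def replace_bare_stars_py (smiles : String) (labels : List String) : String :=
  String.ofList (pvAGo smiles.toList labels 0 0)

-- ===== PORT B =====
-- the for-loop of fill over pieces[1:] (iterator state = remaining labels), ported as recursion over the pieces
def pvFillGo (pieces : List (List Char)) (labs : List String) : List Char × List String :=
  match pieces with
  | [] => ([], labs)
  | p :: ps =>
    let lab := labs.headD "R"                       -- next(it, 'R')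
    let r := pvFillGo ps labs.tail
    ('[' :: lab.toList ++ ']' :: p ++ r.1, r.2)

-- fill(seg): seg.split('*'), first piece verbatim, then '[label]' before each later piece
def pvFill (seg : List Char) (labs : List String) : List Char × List String :=
  match PySem.Chars.splitOn seg ['*'] with
  | [] => ([], labs)                                 -- unreachable: split never returns []
  | p0 :: ps =>
    let r := pvFillGo ps labs
    (p0 ++ r.1, r.2)

-- chunk_out(chunk)
def pvChunkOut (chunk : List Char) (labs : List String) : List Char × List String :=
  let b := PySem.Chars.find chunk ['[']              -- chunk.find('[')
  if b = -1 then pvFill chunk labs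
  else
    let r := pvFill (PySem.List.slice chunk none (some b)) labs   -- fill(chunk[:b])
    (r.1 ++ PySem.List.slice chunk (some b) none, r.2)            -- + chunk[b:]

-- ']'.join(chunk_out(c) for c in ...), the generator threading the shared label iterator left to right
def pvJoinGo (chunks : List (List Char)) (labs : List String) : List Char :=
  match chunks with
  | [] => []
  | [c] => (pvChunkOut c labs).1
  | c :: cs =>
    let r := pvChunkOut c labs
    r.1 ++ ']' :: pvJoinGo cs r.2

def replace_bare_stars_py_alt (smiles : String) (labels : List String) : String :=
  String.ofList (pvJoinGo (PySem.Chars.splitOn smiles.toList [']']) labels)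

-- ===== PRECONDITION & SPEC =====
def Spec_replace_bare_stars_py (smiles : String) (labels : List String) (out : String) : Prop := out = replace_bare_stars_py_alt smiles labels
instance (smiles : String) (labels : List String) (out : String) : Decidable (Spec_replace_bare_stars_py smiles labels out) := by unfold Spec_replace_bare_stars_py; infer_instance

-- ===== CLAIM (what is proved, stated in full; the proofs are below) =====
def Claim_equal_replace_bare_stars_py : Prop := ∀ (smiles : String) (labels : List String), Dom_replace_bare_stars_py smiles labels → Spec_replace_bare_stars_py smiles labels (replace_bare_stars_py smiles labels)

-- ===== LEMMAS AND PROOFS =====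

-- the Boolean predicate "is not the character c", kept as a named def so simp does not renormalise it
def pvNotC (c : Char) (x : Char) : Bool := x ≠ c

theorem pvNotC_true {c x : Char} (h : ¬ x = c) : pvNotC c x = true := by simp [pvNotC, h]

theorem pvNotC_f (c : Char) : ¬ (pvNotC c c = true) := by simp [pvNotC]

theorem pvTakeWhile_all (cs : List Char) (c : Char) (h : c ∉ cs) :
    cs.takeWhile (pvNotC c) = cs := by
  induction cs with
  | nil => rfl
  | cons a t ih =>
    simp only [List.mem_cons, not_or] at h
    rw [List.takeWhile_cons, if_pos (pvNotC_true (fun e => h.1 e.symm)), ih h.2]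

theorem pvTake_app (h : List Char) (c : Char) (hb : c ∉ h) (tl : List Char) :
    (h ++ c :: tl).takeWhile (pvNotC c) = h := by
  induction h with
  | nil => rw [List.nil_append, List.takeWhile_cons, if_neg (pvNotC_f c)]
  | cons a t ih =>
    simp only [List.mem_cons, not_or] at hb
    rw [List.cons_append, List.takeWhile_cons, if_pos (pvNotC_true (fun e => hb.1 e.symm)),
      ih hb.2]

theorem pvDrop_app (h : List Char) (c : Char) (hb : c ∉ h) (tl : List Char) :
    (h ++ c :: tl).dropWhile (pvNotC c) = c :: tl := by
  induction h with
  | nil => rw [List.nil_append, List.dropWhile_cons, if_neg (pvNotC_f c)]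
  | cons a t ih =>
    simp only [List.mem_cons, not_or] at hb
    rw [List.cons_append, List.dropWhile_cons, if_pos (pvNotC_true (fun e => hb.1 e.symm)),
      ih hb.2]

theorem pvMem_take {x : Char} {cs : List Char} {c : Char}
    (h : x ∈ cs.takeWhile (pvNotC c)) : ¬ x = c := by
  have := List.mem_takeWhile_imp h
  simpa [pvNotC] using this

theorem pvDropWhile_head (cs : List Char) (c : Char) (h : c ∈ cs) :
    cs.dropWhile (pvNotC c) = c :: (cs.dropWhile (pvNotC c)).tail := by
  induction cs with
  | nil => cases h
  | cons a t ih =>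
    by_cases ha : a = c
    · subst ha
      rw [List.dropWhile_cons, if_neg (pvNotC_f a)]
      rfl
    · have hm : c ∈ t := by
        rcases List.mem_cons.mp h with h' | h'
        · exact absurd h'.symm ha
        · exact h'
      rw [List.dropWhile_cons, if_pos (pvNotC_true ha), ih hm]
      rfl

theorem pvSplit_self (cs : List Char) (c : Char) (h : c ∈ cs) :
    cs = cs.takeWhile (pvNotC c) ++ c :: (cs.dropWhile (pvNotC c)).tail := by
  conv_lhs => rw [← List.takeWhile_append_dropWhile (p := pvNotC c) (l := cs),
    pvDropWhile_head cs c h]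

theorem pvTail_len (cs : List Char) (c : Char) (h : c ∈ cs) :
    ((cs.dropWhile (pvNotC c)).tail).length < cs.length := by
  have h3 : cs.length = (cs.takeWhile (pvNotC c)).length + (((cs.dropWhile (pvNotC c)).tail).length + 1) := by
    conv_lhs => rw [pvSplit_self cs c h]
    simp only [List.length_append, List.length_cons]
  omega

-- common reference scanner: one pass over the remaining characters, returning output and leftover labels
def pvT (cs : List Char) (labs : List String) : List Char × List String :=
  match cs with
  | [] => ([], labs)
  | ch :: rest =>
    if ch = '[' then
      if h : ']' ∈ rest then
        let r := pvT ((rest.dropWhile (pvNotC ']')).tail) labs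
        ('[' :: rest.takeWhile (pvNotC ']') ++ ']' :: r.1, r.2)
      else ('[' :: rest, labs)
    else if ch = '*' then
      let r := pvT rest labs.tail
      ('[' :: (labs.headD "R").toList ++ ']' :: r.1, r.2)
    else
      let r := pvT rest labs
      (ch :: r.1, r.2)
termination_by cs.length
decreasing_by
  · have := pvTail_len rest ']' h; simp only [List.length_cons]; omega
  · simp
  · simp

-- single-character split, in recursive form
def pvSplitC (cs : List Char) (c : Char) : List (List Char) :=
  if h : c ∈ cs then
    cs.takeWhile (pvNotC c) :: pvSplitC ((cs.dropWhile (pvNotC c)).tail) c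
  else [cs]
termination_by cs.length
decreasing_by exact pvTail_len cs c h

theorem pvSplitC_ne_nil (cs : List Char) (c : Char) : pvSplitC cs c ≠ [] := by
  rw [pvSplitC]; split <;> simp

-- PySem.Chars.find on a single-character needle
theorem pvFindGo_single (c : Char) (cs : List Char) : ∀ (k : Nat),
    PySem.Chars.find.go [c] cs k =
      if c ∈ cs then ((k : Int) + (cs.takeWhile (pvNotC c)).length) else -1 := by
  induction cs with
  | nil => intro k; simp [PySem.Chars.find.go]
  | cons h t ih =>
    intro k
    rw [PySem.Chars.find.go]
    by_cases hc : h = c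
    · subst hc
      have : ([h].isPrefixOf (h :: t)) = true := by simp [List.isPrefixOf]
      rw [this]
      rw [List.takeWhile_cons, if_neg (pvNotC_f h)]
      simp
    · have hpre : ([c].isPrefixOf (h :: t)) = false := by
        simp [List.isPrefixOf]
        exact fun e => hc e.symm
      rw [hpre]
      simp only [Bool.false_eq_true, if_false, ih (k + 1)]
      rw [List.takeWhile_cons, if_pos (pvNotC_true hc)]
      by_cases hm : c ∈ t
      · have hmem : c ∈ h :: t := List.mem_cons_of_mem _ hm
        simp [hm, hmem]
        push_cast; ring
      · have hmem : c ∉ h :: t := by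
          simp only [List.mem_cons, not_or]
          exact ⟨fun e => hc e.symm, hm⟩
        simp [hm, hmem]

theorem pvFind_single (cs : List Char) (c : Char) :
    PySem.Chars.find cs [c] =
      if c ∈ cs then ((cs.takeWhile (pvNotC c)).length : Int) else -1 := by
  have := pvFindGo_single c cs 0
  simpa [PySem.Chars.find] using this

-- PySem.Chars.splitOn on a single-character separator
theorem pvSplitOnGo_single (c : Char) (cs : List Char) : ∀ (fuel : Nat) (cur : List Char) (acc : List (List Char)),
    cs.length ≤ fuel →
    PySem.Chars.splitOn.go [c] fuel cs cur acc =
      acc.reverse ++ (cur.reverse ++ cs.takeWhile (pvNotC c)) ::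
        (if c ∈ cs then pvSplitC ((cs.dropWhile (pvNotC c)).tail) c else []) := by
  induction cs with
  | nil =>
    intro fuel cur acc _
    match fuel with
    | 0 => simp [PySem.Chars.splitOn.go]
    | f + 1 => simp [PySem.Chars.splitOn.go]
  | cons h t ih =>
    intro fuel cur acc hf
    match fuel with
    | 0 => simp at hf
    | f + 1 =>
      rw [PySem.Chars.splitOn.go]
      by_cases hc : h = c
      · subst hc
        have hpre : ([h].isPrefixOf (h :: t)) = true := by simp [List.isPrefixOf]
        rw [hpre]
        simp only [if_true]
        have hdrop : List.drop [h].length (h :: t) = t := rfl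
        rw [hdrop, ih f [] (cur.reverse :: acc) (by simp only [List.length_cons] at hf; omega)]
        have hsp : pvSplitC t h =
            t.takeWhile (pvNotC h) ::
              (if h ∈ t then pvSplitC ((t.dropWhile (pvNotC h)).tail) h else []) := by
          rw [pvSplitC]
          by_cases hm : h ∈ t
          · simp [hm]
          · simp [hm, pvTakeWhile_all t h hm]
        rw [List.takeWhile_cons, if_neg (pvNotC_f h), List.dropWhile_cons, if_neg (pvNotC_f h)]
        simp [hsp]
      · have hpre : ([c].isPrefixOf (h :: t)) = false := by
          simp [List.isPrefixOf]
          exact fun e => hc e.symm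
        rw [hpre]
        simp only [Bool.false_eq_true, if_false]
        rw [ih f (h :: cur) acc (by simp only [List.length_cons] at hf; omega)]
        rw [List.takeWhile_cons, if_pos (pvNotC_true hc), List.dropWhile_cons, if_pos (pvNotC_true hc)]
        by_cases hm : c ∈ t
        · have : c ∈ h :: t := List.mem_cons_of_mem _ hm
          simp [hm, this]
        · have : c ∉ h :: t := by
            simp only [List.mem_cons, not_or]
            exact ⟨fun e => hc e.symm, hm⟩
          simp [hm, this]

theorem pvSplitOn_single (cs : List Char) (c : Char) :
    PySem.Chars.splitOn cs [c] = pvSplitC cs c := by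
  rw [PySem.Chars.splitOn, pvSplitOnGo_single c cs (cs.length + 1) [] [] (by omega)]
  conv_rhs => rw [pvSplitC]
  by_cases hm : c ∈ cs
  · simp [hm]
  · simp [hm, pvTakeWhile_all cs c hm]

-- pvT processes a bracket-free prefix independently of what follows
theorem pvT_append (head : List Char) (hb : '[' ∉ head) : ∀ (r : List Char) (labs : List String),
    pvT (head ++ r) labs =
      ((pvT head labs).1 ++ (pvT r (pvT head labs).2).1, (pvT r (pvT head labs).2).2) := by
  induction head with
  | nil => intro r labs; simp [pvT]
  | cons ch rest ih =>
    intro r labs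
    have hb' := hb
    simp only [List.mem_cons, not_or] at hb'
    have hne : ¬ ch = '[' := fun e => hb'.1 e.symm
    have hrest : '[' ∉ rest := hb'.2
    rw [List.cons_append, pvT]
    by_cases hstar : ch = '*'
    · subst hstar
      simp only [if_neg (by decide : ¬('*' = '['))]
      rw [ih hrest r labs.tail]
      conv_rhs => rw [pvT]
      simp
    · simp only [if_neg hne, if_neg hstar]
      rw [ih hrest r labs]
      conv_rhs => rw [pvT]
      simp [if_neg hne, if_neg hstar]

-- on a star-free, bracket-free run pvT is the identity
theorem pvT_plain (seg : List Char) (h : ∀ x ∈ seg, ¬ x = '[' ∧ ¬ x = '*') (labs : List String) :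
    pvT seg labs = (seg, labs) := by
  induction seg with
  | nil => simp [pvT]
  | cons ch rest ih =>
    have hch := h ch (List.mem_cons_self ..)
    rw [pvT]
    simp only [if_neg hch.1, if_neg hch.2]
    rw [ih (fun x hx => h x (List.mem_cons_of_mem _ hx))]

-- a ']'-free prefix followed by ']': the scanner emits the prefix's output, the ']', then continues
theorem pvT_chunk_append (h : List Char) (hb : ']' ∉ h) : ∀ (tl : List Char) (labs : List String),
    pvT (h ++ ']' :: tl) labs =
      ((pvT h labs).1 ++ ']' :: (pvT tl (pvT h labs).2).1, (pvT tl (pvT h labs).2).2) := by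
  induction h with
  | nil =>
    intro tl labs
    rw [List.nil_append, pvT]
    simp [pvT]
  | cons ch rest ih =>
    intro tl labs
    simp only [List.mem_cons, not_or] at hb
    have hrest : ']' ∉ rest := hb.2
    rw [List.cons_append, pvT]
    by_cases hbr : ch = '['
    · subst hbr
      have hmem : ']' ∈ rest ++ ']' :: tl := by simp
      simp only [if_pos rfl, dif_pos hmem]
      rw [pvTake_app rest ']' hrest tl, pvDrop_app rest ']' hrest tl]
      conv_rhs => rw [pvT]
      simp only [if_pos rfl, dif_neg hrest]
      simp
    · by_cases hstar : ch = '*'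
      · subst hstar
        simp only [if_neg (by decide : ¬('*' = '['))]
        rw [ih hrest tl labs.tail]
        conv_rhs => rw [pvT]
        simp
      · simp only [if_neg hbr, if_neg hstar]
        rw [ih hrest tl labs]
        conv_rhs => rw [pvT]
        simp [if_neg hbr, if_neg hstar]

-- fill agrees with the scanner on bracket-free segments
theorem pvFill_eq_pvT_aux : ∀ (n : Nat) (seg : List Char), seg.length ≤ n → '[' ∉ seg →
    ∀ (labs : List String), pvFill seg labs = pvT seg labs := by
  intro n
  induction n with
  | zero =>
    intro seg hlen hb labs
    have : seg = [] := List.eq_nil_of_length_eq_zero (by omega)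
    subst this
    simp [pvFill, PySem.Chars.splitOn, PySem.Chars.splitOn.go, pvFillGo, pvT]
  | succ n ih =>
    intro seg hlen hb labs
    unfold pvFill
    rw [pvSplitOn_single]
    by_cases hs : '*' ∈ seg
    · -- seg = tk ++ '*' :: tl
      have hsplit := pvSplit_self seg '*' hs
      set tk := seg.takeWhile (pvNotC '*') with htk
      set tl := (seg.dropWhile (pvNotC '*')).tail with htl
      have hlen' := congrArg List.length hsplit
      simp at hlen'
      -- unfold one step of pvSplitC
      rw [pvSplitC]
      simp only [dif_pos hs]
      -- pvFillGo on a head::tail split list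
      obtain ⟨q0, qs, hq⟩ : ∃ q0 qs, pvSplitC tl '*' = q0 :: qs := by
        cases hq : pvSplitC tl '*' with
        | nil => exact absurd hq (pvSplitC_ne_nil tl '*')
        | cons q0 qs => exact ⟨q0, qs, rfl⟩
      have hbtl : '[' ∉ tl := fun hx => hb (by rw [hsplit]; simp [hx])
      have hfill_tl : pvFill tl labs.tail = (q0 ++ (pvFillGo qs labs.tail).1, (pvFillGo qs labs.tail).2) := by
        unfold pvFill
        rw [pvSplitOn_single, hq]
      have hih := ih tl (by omega) hbtl labs.tail
      rw [hq]
      simp only [pvFillGo]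
      -- rhs: decompose seg
      conv_rhs => rw [hsplit]
      have hbtk : '[' ∉ tk := fun hx => hb (by rw [hsplit]; simp [hx])
      rw [pvT_append tk hbtk ('*' :: tl) labs]
      rw [pvT_plain tk (fun x hx => ⟨fun e => hbtk (e ▸ hx), pvMem_take hx⟩) labs]
      conv_rhs => rw [pvT]
      simp only [if_neg (by decide : ¬('*' = '[')), if_pos rfl]
      rw [← hih, hfill_tl]
      simp
      exact htk.symm
    · -- no star: single piece
      rw [pvSplitC]
      simp only [dif_neg hs]
      simp only [pvFillGo]
      rw [pvT_plain seg (fun x hx => ⟨fun e => hb (e ▸ hx), fun e => hs (e ▸ hx)⟩) labs]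
      simp

theorem pvFill_eq_pvT (seg : List Char) (hb : '[' ∉ seg) (labs : List String) :
    pvFill seg labs = pvT seg labs :=
  pvFill_eq_pvT_aux seg.length seg le_rfl hb labs

-- chunk_out agrees with the scanner on ']'-free chunks
theorem pvChunkOut_eq_pvT (chunk : List Char) (hb : ']' ∉ chunk) (labs : List String) :
    pvChunkOut chunk labs = pvT chunk labs := by
  unfold pvChunkOut
  rw [pvFind_single]
  by_cases hm : '[' ∈ chunk
  · have hsplit := pvSplit_self chunk '[' hm
    set t1 := chunk.takeWhile (pvNotC '[') with ht1
    set t2 := (chunk.dropWhile (pvNotC '[')).tail with ht2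
    rw [if_pos hm]
    rw [if_neg (by omega : ¬((t1.length : Int) = -1))]
    have hslice1 : PySem.List.slice chunk none (some ((t1.length : Nat) : Int)) = t1 := by
      rw [PySem.List.slice_to_natCast]
      conv_lhs => rw [hsplit]
      exact List.take_left
    have hslice2 : PySem.List.slice chunk (some ((t1.length : Nat) : Int)) none = '[' :: t2 := by
      rw [PySem.List.slice_from_natCast]
      conv_lhs => rw [hsplit]
      exact List.drop_left
    rw [hslice1, hslice2]
    have hbt1 : '[' ∉ t1 := fun hx => pvMem_take hx rfl
    have hbt2 : ']' ∉ t2 := fun hx => hb (by rw [hsplit]; simp [hx])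
    rw [pvFill_eq_pvT t1 hbt1 labs]
    conv_rhs => rw [hsplit]
    rw [pvT_append t1 hbt1 ('[' :: t2) labs]
    conv_rhs => rw [pvT]
    simp only [if_pos rfl, dif_neg hbt2]
    simp
  · rw [if_neg hm]
    simp only [if_pos rfl]
    exact pvFill_eq_pvT chunk hm labs

-- the whole of B is the scanner
theorem pvJoinGo_eq_pvT_aux : ∀ (n : Nat) (cs : List Char), cs.length ≤ n →
    ∀ (labs : List String), pvJoinGo (pvSplitC cs ']') labs = (pvT cs labs).1 := by
  intro n
  induction n with
  | zero =>
    intro cs hlen labs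
    have : cs = [] := List.eq_nil_of_length_eq_zero (by omega)
    subst this
    rw [pvSplitC]
    simp [pvJoinGo, pvChunkOut, pvFind_single, pvFill, PySem.Chars.splitOn,
      PySem.Chars.splitOn.go, pvFillGo, pvT]
  | succ n ih =>
    intro cs hlen labs
    rw [pvSplitC]
    by_cases hm : ']' ∈ cs
    · simp only [dif_pos hm]
      have hsplit := pvSplit_self cs ']' hm
      set h1 := cs.takeWhile (pvNotC ']') with hh1
      set tl := (cs.dropWhile (pvNotC ']')).tail with htl
      have hlen' := congrArg List.length hsplit
      simp at hlen'
      obtain ⟨q0, qs, hq⟩ : ∃ q0 qs, pvSplitC tl ']' = q0 :: qs := by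
        cases hq : pvSplitC tl ']' with
        | nil => exact absurd hq (pvSplitC_ne_nil tl ']')
        | cons q0 qs => exact ⟨q0, qs, rfl⟩
      rw [hq]
      show (pvChunkOut h1 labs).1 ++ ']' :: pvJoinGo (q0 :: qs) (pvChunkOut h1 labs).2 =
        (pvT cs labs).1
      rw [← hq, ih tl (by omega) (pvChunkOut h1 labs).2]
      have hbh1 : ']' ∉ h1 := fun hx => pvMem_take hx rfl
      rw [pvChunkOut_eq_pvT h1 hbh1 labs]
      conv_rhs => rw [hsplit, pvT_chunk_append h1 hbh1 tl labs]
    · simp only [dif_neg hm]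
      show (pvChunkOut cs labs).1 = (pvT cs labs).1
      rw [pvChunkOut_eq_pvT cs hm labs]

theorem pvJoinGo_eq_pvT (cs : List Char) (labs : List String) :
    pvJoinGo (pvSplitC cs ']') labs = (pvT cs labs).1 :=
  pvJoinGo_eq_pvT_aux cs.length cs le_rfl labs

-- the whole of A is the scanner
theorem pvAGo_eq_pvT_aux : ∀ (n : Nat) (cs : List Char) (labels : List String) (i idx : Nat),
    cs.length - i ≤ n →
    pvAGo cs labels i idx = (pvT (cs.drop i) (labels.drop idx)).1 := by
  intro n
  induction n with
  | zero =>
    intro cs labels i idx hlen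
    rw [pvAGo]
    rw [dif_neg (by omega : ¬ i < cs.length)]
    rw [List.drop_eq_nil_of_le (by omega)]
    simp [pvT]
  | succ n ih =>
    intro cs labels i idx hlen
    by_cases hi : i < cs.length
    · rw [pvAGo, dif_pos hi]
      have hcons : cs.drop i = cs[i] :: cs.drop (i + 1) := List.drop_eq_getElem_cons hi
      have hff : PySem.Chars.findFrom cs [']'] ((i : Int) + 1) none =
          if PySem.Chars.find (cs.drop (i + 1)) [']'] = -1 then -1
          else ((i + 1 : Nat) : Int) + PySem.Chars.find (cs.drop (i + 1)) [']'] := by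
        have := PySem.Chars.findFrom_natCast cs [']'] (i + 1) (by omega)
        push_cast at this ⊢
        exact_mod_cast this
      by_cases hbr : cs[i] = '['
      · rw [if_pos hbr]
        set rest := cs.drop (i + 1) with hrest
        by_cases hm : ']' ∈ rest
        · set tk := rest.takeWhile (pvNotC ']') with htk
          set tl := (rest.dropWhile (pvNotC ']')).tail with htl
          have hsplit := pvSplit_self rest ']' hm
          rw [← htk, ← htl] at hsplit
          have hfind : PySem.Chars.find rest [']'] = ((tk.length : Nat) : Int) := by
            rw [pvFind_single, if_pos hm]
          have hj2 : pvJ2 cs i = ((i + 1 + tk.length : Nat) : Int) := by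
            simp only [pvJ2, hff, hfind, ← hrest]
            rw [if_neg (by omega), if_neg (by omega)]
            push_cast; ring
          rw [hj2]
          have htoNat : ((i + 1 + tk.length : Nat) : Int).toNat = i + 1 + tk.length := by omega
          rw [htoNat]
          have hcast : ((i + 1 + tk.length : Nat) : Int) + 1 = ((i + tk.length + 2 : Nat) : Int) := by
            push_cast; ring
          rw [hcast, PySem.List.slice_natCast]
          have harith : i + tk.length + 2 - i = tk.length + 2 := by omega
          rw [harith]
          -- the bracket token: take (tk.length+2) (drop i cs) = cs[i] :: tk ++ [']']
          have htoken : (cs.drop i).take (tk.length + 2) = cs[i] :: tk ++ [']'] := by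
            rw [hcons, hsplit, List.take_succ_cons, List.take_append,
              List.take_of_length_le (by omega)]
            have : tk.length + 1 - tk.length = 1 := by omega
            rw [this]
            simp
          rw [htoken]
          -- the recursive call continues at the character after the ']'
          rw [ih cs labels (i + 1 + tk.length + 1) idx (by omega)]
          have hdrop2 : cs.drop (i + 1 + tk.length + 1) = tl := by
            have h1 : i + 1 + tk.length + 1 = (i + 1) + (tk.length + 1) := by omega
            rw [h1, ← List.drop_drop, ← hrest, hsplit]
            calc List.drop (tk.length + 1) (tk ++ ']' :: tl)
                = List.drop (tk.length + 1) (tk ++ [']'] ++ tl) := by simp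
              _ = tl := by
                  rw [show tk.length + 1 = (tk ++ [']']).length from by simp, List.drop_left]
          rw [hdrop2]
          conv_rhs => rw [hcons, pvT]
          simp only [if_pos hbr, ← hrest, dif_pos hm, ← htk, ← htl]
          simp [hbr]
        · have hfind : PySem.Chars.find rest [']'] = -1 := by
            rw [pvFind_single, if_neg hm]
          have hj2 : pvJ2 cs i = (cs.length : Int) - 1 := by
            simp only [pvJ2, hff, hfind, ← hrest]
            simp
          rw [hj2]
          have htoNat : ((cs.length : Int) - 1).toNat + 1 = cs.length := by omega
          rw [htoNat]
          have hcast : (cs.length : Int) - 1 + 1 = ((cs.length : Nat) : Int) := by ring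
          rw [hcast, PySem.List.slice_natCast]
          rw [List.take_of_length_le (by rw [List.length_drop])]
          rw [ih cs labels cs.length idx (by omega), List.drop_length]
          conv_rhs => rw [hcons, pvT]
          simp only [if_pos hbr, ← hrest, dif_neg hm]
          simp [pvT, hbr, hcons]
      · rw [if_neg hbr]
        by_cases hstar : cs[i] = '*'
        · rw [if_pos hstar]
          have hlab : (if idx < labels.length then labels.getD idx "R" else "R") =
              (labels.drop idx).headD "R" := by
            by_cases hidx : idx < labels.length
            · rw [if_pos hidx]
              rw [List.getD_eq_getElem?_getD, List.headD_eq_head?_getD, List.head?_drop]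
            · rw [if_neg hidx]
              rw [List.drop_eq_nil_of_le (by omega)]
              rfl
          rw [hlab, ih cs labels (i + 1) (idx + 1) (by omega)]
          conv_rhs => rw [hcons, pvT]
          simp only [if_neg hbr, if_pos hstar]
          have hdt : labels.drop (idx + 1) = (labels.drop idx).tail := by
            rw [List.tail_drop]
          rw [hdt]
          simp
        · rw [if_neg hstar]
          rw [ih cs labels (i + 1) idx (by omega)]
          conv_rhs => rw [hcons, pvT]
          simp only [if_neg hbr, if_neg hstar]
    · rw [pvAGo, dif_neg hi]
      rw [List.drop_eq_nil_of_le (by omega)]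
      simp [pvT]

theorem pvAGo_eq_pvT (cs : List Char) (labels : List String) (i idx : Nat) :
    pvAGo cs labels i idx = (pvT (cs.drop i) (labels.drop idx)).1 :=
  pvAGo_eq_pvT_aux (cs.length - i) cs labels i idx le_rfl

-- ===== VERDICT (by name: the statement is the Claim_ definition above) =====
theorem replace_bare_stars_py_spec : Claim_equal_replace_bare_stars_py := by
  intro smiles labels _
  show replace_bare_stars_py smiles labels = replace_bare_stars_py_alt smiles labels
  unfold replace_bare_stars_py replace_bare_stars_py_alt
  rw [pvAGo_eq_pvT, pvSplitOn_single, pvJoinGo_eq_pvT]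
  simp
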